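-- pv_equiv track=rewrite | github.com/rojinva/RAG-Framework-API | src/core/tools/community/bfs_retriever/retriever_tool.py | build_spanning_tree
-- ===== SOURCE A (Python) =====
-- from collections import defaultdict, deque
-- from typing import List, Dict, Optional, Tuple, Set, Type
--
-- def build_spanning_tree(
--
--     adj: Dict[str, Set[Tuple[str,str]]],
--     roots: List[str]
-- ) -> Tuple[Dict[str, Optional[str]], Dict[str,str]]:
--     parent: Dict[str, Optional[str]] = {r: None for r in roots}
--     edge:   Dict[str, str]           = {r: ""   for r in roots}
--     q = deque(roots)
--
--     while q:
--         u = q.popleft()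
--         for v, rel in sorted(adj.get(u, []), key=lambda x: x[0]):
--             if v not in parent:
--                 parent[v] = u
--                 edge[v]   = rel
--                 q.append(v)
--     # ensure all keys/values are str(None) safe
--     return ({str(k): (str(v) if v else None) for k, v in parent.items()},
--             {str(k): rel for k, rel in edge.items()})
-- ===== SOURCE B (Python) =====
-- def build_spanning_tree(adj, roots):
--     # Level-by-level "gather then resolve": instead of sorting each node's
--     # neighbours and claiming sequentially, scan the frontier's raw adjacency
--     # lists once to record each unseen node's first claim (frontier index,
--     # relation), then order the whole level with a single sort by
--     # (claiming index, node name) and commit the batch.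
--     parent = {r: None for r in roots}
--     edge = {r: "" for r in roots}
--     frontier = list(parent)
--     while frontier:
--         cand = {}
--         for i, u in enumerate(frontier):
--             for v, rel in adj.get(u, []):
--                 if v not in parent and v not in cand:
--                     cand[v] = (i, rel)
--         nxt = sorted(cand, key=lambda v: (cand[v][0], v))
--         for v in nxt:
--             i, rel = cand[v]
--             parent[v] = frontier[i]
--             edge[v] = rel
--         frontier = nxt
--     return ({str(k): (str(v) if v else None) for k, v in parent.items()},
--             {str(k): rel for k, rel in edge.items()})
-- ===== Notes on version B (the rewrite author's own statement) =====
-- stated objective: alternative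
-- what changed: Replaced A's FIFO-queue BFS that sorts every node's neighbour list and claims children sequentially with a gather-then-resolve level algorithm: one unsorted scan of the frontier's raw adjacency lists builds a first-claim map v->(frontier position, relation), a single per-level sort of the claimed nodes by (claim position, name) reconstructs the discovery order, and the level is committed as a batch.
import Mathlib
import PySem

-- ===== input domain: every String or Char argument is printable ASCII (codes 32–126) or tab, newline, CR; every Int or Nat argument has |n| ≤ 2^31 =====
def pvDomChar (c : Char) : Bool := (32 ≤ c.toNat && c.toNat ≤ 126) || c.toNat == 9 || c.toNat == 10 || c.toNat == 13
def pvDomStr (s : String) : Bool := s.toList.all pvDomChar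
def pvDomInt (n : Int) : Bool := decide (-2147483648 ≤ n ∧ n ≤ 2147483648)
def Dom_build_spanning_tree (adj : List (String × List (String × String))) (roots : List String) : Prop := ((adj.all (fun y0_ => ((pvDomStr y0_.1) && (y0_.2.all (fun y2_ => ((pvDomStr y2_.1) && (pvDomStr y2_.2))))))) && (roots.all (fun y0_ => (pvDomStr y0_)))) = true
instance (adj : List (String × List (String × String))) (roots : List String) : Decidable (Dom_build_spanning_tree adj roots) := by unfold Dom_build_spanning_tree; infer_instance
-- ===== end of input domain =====

-- B replaces A's FIFO-queue BFS (per-node neighbour sort + sequential claiming) with a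
-- gather-then-resolve level algorithm: one unsorted scan of the frontier's raw adjacency
-- lists builds a first-claim map, and a single per-level sort by (claim position, name)
-- reconstructs the discovery order (objective: alternative); same return value everywhere.

-- ===== PORT A =====
-- adj.get(u, []) (shared verbatim by both Pythons)
def rawNbrs (adj : List (String × List (String × String))) (u : String) : List (String × String) :=
  (PySem.Dict.mk adj).getD u []

-- sorted(adj.get(u, []), key=lambda x: x[0])
def nbrs (adj : List (String × List (String × String))) (u : String) : List (String × String) :=
  PySem.List.sorted (rawNbrs adj u) (fun x => x.1) false

-- the body of 'for v, rel in …: if v not in parent: …' in A;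
-- the third state component is the queue being appended to
def visit (u : String)
    (st : PySem.Dict String (Option String) × PySem.Dict String String × List String)
    (vr : String × String) :
    PySem.Dict String (Option String) × PySem.Dict String String × List String :=
  if !(st.1.contains vr.1) then
    (st.1.insert vr.1 (some u), st.2.1.insert vr.1 vr.2, st.2.2 ++ [vr.1])
  else st

-- termination infrastructure (used by the ports' decreasing_by)
def targets (adj : List (String × List (String × String))) : List String :=
  adj.flatMap (fun kv => kv.2.map (·.1))

def unvis (adj : List (String × List (String × String)))
    (p : PySem.Dict String (Option String)) : Nat :=
  ((PySem.Set.ofList (targets adj)).filter (fun v => !(p.contains v))).length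

lemma filter_and_ne_length {S : List String} (hnd : S.Nodup) {v : String} (hv : v ∈ S)
    {q : String → Bool} (hq : q v = true) :
    (S.filter (fun x => !(x == v) && q x)).length + 1 = (S.filter q).length := by
  induction S with
  | nil => cases hv
  | cons a S ih =>
    rcases List.nodup_cons.mp hnd with ⟨hna, hndS⟩
    rcases List.mem_cons.mp hv with rfl | hv'
    · have : S.filter (fun x => !(x == v) && q x) = S.filter q := by
        apply List.filter_congr
        intro x hx
        have : x ≠ v := fun h => hna (h ▸ hx)
        simp [this]
      simp [List.filter_cons, hq, this]
    · have hav : a ≠ v := fun h => hna (h ▸ hv')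
      by_cases hqa : q a = true
      · simp [hqa, hav, ih hndS hv']
      · simp at hqa
        simp [hqa]
        exact ih hndS hv'

lemma rawNbrs_mem {adj : List (String × List (String × String))} {u : String}
    {vr : String × String} (h : vr ∈ rawNbrs adj u) : vr.1 ∈ targets adj := by
  unfold rawNbrs at h
  induction adj with
  | nil => simp [PySem.Dict.getD, PySem.Dict.get?] at h
  | cons kv rest ih =>
    rw [PySem.Dict.getD_eq_get?_getD, PySem.Dict.get?_mk_cons] at h
    by_cases hk : (kv.1 == u) = true
    · simp [hk] at h
      exact List.mem_flatMap.mpr ⟨kv, List.mem_cons_self .., List.mem_map.mpr ⟨vr, h, rfl⟩⟩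
    · rw [if_neg hk] at h
      rw [← PySem.Dict.getD_eq_get?_getD] at h
      have := ih h
      simp only [targets, List.flatMap_cons, List.mem_append]
      right
      exact this

lemma nbrs_mem {adj : List (String × List (String × String))} {u : String}
    {vr : String × String} (h : vr ∈ nbrs adj u) : vr.1 ∈ targets adj := by
  have h' : vr ∈ rawNbrs adj u :=
    (PySem.List.mem_sorted (xs := rawNbrs adj u)
      (key := fun x => x.1) (rev := false) (x := vr)).mp h
  exact rawNbrs_mem h'

lemma unvis_insert_lt {adj : List (String × List (String × String))}
    {p : PySem.Dict String (Option String)} {v : String} (w : Option String)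
    (hv : v ∈ targets adj) (hnc : p.contains v = false) :
    unvis adj (p.insert v w) + 1 ≤ unvis adj p := by
  unfold unvis
  have hS : (PySem.Set.ofList (targets adj)).Nodup := PySem.Set.nodup_ofList _
  have hvS : v ∈ PySem.Set.ofList (targets adj) := (PySem.Set.mem_ofList _ _).mpr hv
  have hq : (!(p.contains v)) = true := by simp [hnc]
  have key := filter_and_ne_length (q := fun x => !(p.contains x)) hS hvS hq
  have hfe : ((PySem.Set.ofList (targets adj)).filter (fun x => !((p.insert v w).contains x)))
      = ((PySem.Set.ofList (targets adj)).filter (fun x => !(x == v) && !(p.contains x))) := by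
    apply List.filter_congr
    intro x _
    rw [PySem.Dict.contains_insert]
    cases h : (x == v) <;> simp [h]
  rw [hfe]
  exact Nat.le_of_eq key

lemma visit_measure (adj : List (String × List (String × String))) (u : String) :
    ∀ (l : List (String × String)) (p : PySem.Dict String (Option String))
      (e : PySem.Dict String String) (q : List String),
      (∀ vr ∈ l, vr.1 ∈ targets adj) →
      2 * unvis adj (l.foldl (visit u) (p, e, q)).1 + (l.foldl (visit u) (p, e, q)).2.2.length
        ≤ 2 * unvis adj p + q.length := by
  intro l
  induction l with
  | nil => intro p e q _; simp
  | cons x l ih =>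
    intro p e q hmem
    by_cases hc : p.contains x.1 = true
    · simpa [visit, hc] using ih p e q (fun vr h => hmem vr (List.mem_cons_of_mem _ h))
    · have hx : x.1 ∈ targets adj := hmem x (List.mem_cons_self ..)
      have hnc : p.contains x.1 = false := by simpa using hc
      have hstep := unvis_insert_lt (adj := adj) (p := p) (some u) hx hnc
      have := ih (p.insert x.1 (some u)) (e.insert x.1 x.2) (q ++ [x.1])
        (fun vr h => hmem vr (List.mem_cons_of_mem _ h))
      simp only [visit, hnc, List.foldl_cons, Bool.not_false, if_pos] at *
      simp only [List.length_append, List.length_cons, List.length_nil] at this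
      omega

-- A's loop: 'q = deque(roots); while q: u = q.popleft(); for v, rel in sorted(…): …'
def bfsA (adj : List (String × List (String × String))) :
    List String → PySem.Dict String (Option String) → PySem.Dict String String →
    PySem.Dict String (Option String) × PySem.Dict String String
  | [], p, e => (p, e)
  | u :: q, p, e =>
    let s := (nbrs adj u).foldl (visit u) (p, e, q)
    bfsA adj s.2.2 s.1 s.2.1
termination_by q p _ => 2 * unvis adj p + q.length
decreasing_by
  have h := visit_measure adj u (nbrs adj u) p e q (fun vr h => nbrs_mem h)
  simp only [List.length_cons]
  omega

def build_spanning_tree (adj : List (String × List (String × String))) (roots : List String) :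
    (List (String × Option String)) × (List (String × String)) :=
  let parent : PySem.Dict String (Option String) :=
    roots.foldl (fun d r => d.insert r none) PySem.Dict.empty
  let edge : PySem.Dict String String :=
    roots.foldl (fun d r => d.insert r "") PySem.Dict.empty
  let pe := bfsA adj roots parent edge
  ((pe.1.items.foldl (fun (d : PySem.Dict String (Option String)) kv =>
      d.insert kv.1 (match kv.2 with
        | none => none
        | some s => if s = "" then none else some s)) PySem.Dict.empty).items,
   (pe.2.items.foldl (fun (d : PySem.Dict String String) kv =>
      d.insert kv.1 kv.2) PySem.Dict.empty).items)

-- ===== PORT B =====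
-- 'if v not in parent and v not in cand: cand[v] = (i, rel)'
def candStep (p : PySem.Dict String (Option String)) (iu : Int × String)
    (cand : PySem.Dict String (Int × String)) (vr : String × String) :
    PySem.Dict String (Int × String) :=
  if !(p.contains vr.1) && !(cand.contains vr.1) then cand.insert vr.1 (iu.1, vr.2) else cand

-- 'for v, rel in adj.get(u, []): …' (one frontier entry)
def candGroup (adj : List (String × List (String × String)))
    (p : PySem.Dict String (Option String))
    (cand : PySem.Dict String (Int × String)) (iu : Int × String) :
    PySem.Dict String (Int × String) :=
  (rawNbrs adj iu.2).foldl (candStep p iu) cand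

-- 'cand = {}; for i, u in enumerate(frontier): …'
def candLevel (adj : List (String × List (String × String)))
    (p : PySem.Dict String (Option String)) (fr : List String) :
    PySem.Dict String (Int × String) :=
  (PySem.List.enumerate fr 0).foldl (candGroup adj p) PySem.Dict.empty

-- 'nxt = sorted(cand, key=lambda v: (cand[v][0], v))'
-- (the getD default is never used: every v here is a key of cand)
def nxtOf (cand : PySem.Dict String (Int × String)) : List String :=
  PySem.List.sorted2 cand.keys (fun v => (cand.getD v (0, "")).1) (fun v => v) false

-- 'i, rel = cand[v]; parent[v] = frontier[i]; edge[v] = rel'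
-- (pyGetD defaults are never used: v is a key of cand and 0 ≤ i < len(frontier))
def commitStep (fr : List String) (cand : PySem.Dict String (Int × String))
    (pe : PySem.Dict String (Option String) × PySem.Dict String String) (v : String) :
    PySem.Dict String (Option String) × PySem.Dict String String :=
  (pe.1.insert v (some (PySem.List.pyGetD fr (cand.getD v (0, "")).1 "")),
   pe.2.insert v (cand.getD v (0, "")).2)

-- termination infrastructure for bfsB
lemma candStep_fold_prop (adj : List (String × List (String × String)))
    (p : PySem.Dict String (Option String)) (iu : Int × String) :
    ∀ (l : List (String × String)) (cand : PySem.Dict String (Int × String)),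
      (∀ vr ∈ l, vr.1 ∈ targets adj) →
      (∀ v ∈ cand.keys, p.contains v = false ∧ v ∈ targets adj) →
      ∀ v ∈ (l.foldl (candStep p iu) cand).keys, p.contains v = false ∧ v ∈ targets adj := by
  intro l
  induction l with
  | nil => intro cand _ hc; exact hc
  | cons vr l ih =>
    intro cand hl hc
    simp only [List.foldl_cons]
    by_cases h : (!(p.contains vr.1) && !(cand.contains vr.1)) = true
    · rw [candStep, if_pos h]
      refine ih _ (fun x hx => hl x (List.mem_cons_of_mem _ hx)) ?_
      intro v hv
      rcases (PySem.Dict.mem_keys_insert _ _ _ _).mp hv with rfl | hv'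
      · refine ⟨?_, hl vr (List.mem_cons_self ..) ⟩
        simp at h
        exact h.1
      · exact hc v hv'
    · rw [candStep, if_neg h]
      exact ih _ (fun x hx => hl x (List.mem_cons_of_mem _ hx)) hc

lemma candStep_fold_nodup (p : PySem.Dict String (Option String)) (iu : Int × String) :
    ∀ (l : List (String × String)) (cand : PySem.Dict String (Int × String)),
      cand.keys.Nodup → (l.foldl (candStep p iu) cand).keys.Nodup := by
  intro l
  induction l with
  | nil => intro cand h; exact h
  | cons vr l ih =>
    intro cand h
    simp only [List.foldl_cons]
    by_cases hc : (!(p.contains vr.1) && !(cand.contains vr.1)) = true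
    · rw [candStep, if_pos hc]
      exact ih _ (PySem.Dict.nodup_keys_insert _ _ _ h)
    · rw [candStep, if_neg hc]
      exact ih _ h

lemma candGroup_fold_prop (adj : List (String × List (String × String)))
    (p : PySem.Dict String (Option String)) :
    ∀ (L : List (Int × String)) (cand : PySem.Dict String (Int × String)),
      (∀ v ∈ cand.keys, p.contains v = false ∧ v ∈ targets adj) →
      ∀ v ∈ (L.foldl (candGroup adj p) cand).keys, p.contains v = false ∧ v ∈ targets adj := by
  intro L
  induction L with
  | nil => intro cand hc; exact hc
  | cons iu L ih =>
    intro cand hc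
    simp only [List.foldl_cons]
    exact ih _ (candStep_fold_prop adj p iu _ cand (fun vr hvr => rawNbrs_mem hvr) hc)

lemma candGroup_fold_nodup (adj : List (String × List (String × String)))
    (p : PySem.Dict String (Option String)) :
    ∀ (L : List (Int × String)) (cand : PySem.Dict String (Int × String)),
      cand.keys.Nodup → (L.foldl (candGroup adj p) cand).keys.Nodup := by
  intro L
  induction L with
  | nil => intro cand h; exact h
  | cons iu L ih =>
    intro cand h
    simp only [List.foldl_cons]
    exact ih _ (candStep_fold_nodup p iu _ cand h)

lemma candLevel_keys_prop (adj : List (String × List (String × String)))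
    (p : PySem.Dict String (Option String)) (fr : List String) :
    ∀ v ∈ (candLevel adj p fr).keys, p.contains v = false ∧ v ∈ targets adj := by
  refine candGroup_fold_prop adj p _ _ ?_
  intro v hv
  simp [PySem.Dict.keys_empty] at hv

lemma candLevel_nodup (adj : List (String × List (String × String)))
    (p : PySem.Dict String (Option String)) (fr : List String) :
    (candLevel adj p fr).keys.Nodup := by
  refine candGroup_fold_nodup adj p _ _ ?_
  simp [PySem.Dict.keys_empty]

lemma unvis_foldl_insert (adj : List (String × List (String × String)))
    (f : String → Option String) :
    ∀ (L : List String) (p : PySem.Dict String (Option String)), L.Nodup →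
      (∀ v ∈ L, v ∈ targets adj ∧ p.contains v = false) →
      unvis adj (L.foldl (fun d v => d.insert v (f v)) p) + L.length ≤ unvis adj p := by
  intro L
  induction L with
  | nil => intro p _ _; simp
  | cons v L ih =>
    intro p hnd hmem
    have hv := hmem v (List.mem_cons_self ..)
    have h1 := unvis_insert_lt (adj := adj) (p := p) (f v) hv.1 hv.2
    have h2 := ih (p.insert v (f v)) (List.nodup_cons.mp hnd).2 ?_
    · simp only [List.foldl_cons, List.length_cons]
      omega
    · intro w hw
      refine ⟨(hmem w (List.mem_cons_of_mem _ hw)).1, ?_⟩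
      rw [PySem.Dict.contains_insert]
      have hne : w ≠ v := fun h => (List.nodup_cons.mp hnd).1 (h ▸ hw)
      simp [hne, (hmem w (List.mem_cons_of_mem _ hw)).2]

lemma bfsB_measure (adj : List (String × List (String × String)))
    (fr : List String) (p : PySem.Dict String (Option String))
    (e : PySem.Dict String String) :
    2 * unvis adj ((nxtOf (candLevel adj p fr)).foldl
        (commitStep fr (candLevel adj p fr)) (p, e)).1
      + (nxtOf (candLevel adj p fr)).length ≤ 2 * unvis adj p := by
  have hperm : (nxtOf (candLevel adj p fr)).Perm (candLevel adj p fr).keys :=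
    PySem.List.sorted2_perm _ _ _ _
  have hnd : (nxtOf (candLevel adj p fr)).Nodup :=
    (hperm.nodup_iff).mpr (candLevel_nodup adj p fr)
  have hfold : (nxtOf (candLevel adj p fr)).foldl (commitStep fr (candLevel adj p fr)) (p, e)
      = ((nxtOf (candLevel adj p fr)).foldl
            (fun d v => d.insert v
              (some (PySem.List.pyGetD fr ((candLevel adj p fr).getD v (0, "")).1 ""))) p,
         (nxtOf (candLevel adj p fr)).foldl
            (fun d v => d.insert v ((candLevel adj p fr).getD v (0, "")).2) e) :=
    PySem.List.foldl_prod_mk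
      (f := fun (d : PySem.Dict String (Option String)) v => d.insert v
        (some (PySem.List.pyGetD fr ((candLevel adj p fr).getD v (0, "")).1 "")))
      (g := fun (d : PySem.Dict String String) v =>
        d.insert v ((candLevel adj p fr).getD v (0, "")).2) _ _ _
  have hproj : ((nxtOf (candLevel adj p fr)).foldl (commitStep fr (candLevel adj p fr)) (p, e)).1
      = (nxtOf (candLevel adj p fr)).foldl
          (fun d v => d.insert v
            (some (PySem.List.pyGetD fr ((candLevel adj p fr).getD v (0, "")).1 ""))) p := by
    rw [hfold]
  have hmem : ∀ v ∈ nxtOf (candLevel adj p fr), v ∈ targets adj ∧ p.contains v = false := by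
    intro v hv
    have := candLevel_keys_prop adj p fr v (hperm.mem_iff.mp hv)
    exact ⟨this.2, this.1⟩
  have h5 : unvis adj ((nxtOf (candLevel adj p fr)).foldl
        (fun d v => d.insert v
          (some (PySem.List.pyGetD fr ((candLevel adj p fr).getD v (0, "")).1 ""))) p)
      + (nxtOf (candLevel adj p fr)).length ≤ unvis adj p := by
    simpa using unvis_foldl_insert adj
      (fun v => some (PySem.List.pyGetD fr ((candLevel adj p fr).getD v (0, "")).1 ""))
      (nxtOf (candLevel adj p fr)) p hnd hmem
  rw [hproj]
  omega

-- B's loop: 'frontier = list(roots); while frontier: cand = {}; …; nxt = sorted(…); …'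
def bfsB (adj : List (String × List (String × String))) :
    List String → PySem.Dict String (Option String) → PySem.Dict String String →
    PySem.Dict String (Option String) × PySem.Dict String String
  | fr, p, e =>
    if h : fr = [] then (p, e)
    else
      bfsB adj (nxtOf (candLevel adj p fr))
        ((nxtOf (candLevel adj p fr)).foldl (commitStep fr (candLevel adj p fr)) (p, e)).1
        ((nxtOf (candLevel adj p fr)).foldl (commitStep fr (candLevel adj p fr)) (p, e)).2
termination_by fr p _ => 2 * unvis adj p + fr.length
decreasing_by
  have h1 := bfsB_measure adj fr p e
  have h2 := List.length_pos_of_ne_nil h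
  omega

def build_spanning_tree_alt (adj : List (String × List (String × String))) (roots : List String) :
    (List (String × Option String)) × (List (String × String)) :=
  let parent : PySem.Dict String (Option String) :=
    roots.foldl (fun d r => d.insert r none) PySem.Dict.empty
  let edge : PySem.Dict String String :=
    roots.foldl (fun d r => d.insert r "") PySem.Dict.empty
  let pe := bfsB adj roots parent edge
  ((pe.1.items.foldl (fun (d : PySem.Dict String (Option String)) kv =>
      d.insert kv.1 (match kv.2 with
        | none => none
        | some s => if s = "" then none else some s)) PySem.Dict.empty).items,
   (pe.2.items.foldl (fun (d : PySem.Dict String String) kv =>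
      d.insert kv.1 kv.2) PySem.Dict.empty).items)

-- ===== PRECONDITION & SPEC =====
def Spec_build_spanning_tree (adj : List (String × List (String × String))) (roots : List String) (out : (List (String × Option String)) × (List (String × String))) : Prop := out = build_spanning_tree_alt adj roots
instance (adj : List (String × List (String × String))) (roots : List String) (out : (List (String × Option String)) × (List (String × String))) : Decidable (Spec_build_spanning_tree adj roots out) := by unfold Spec_build_spanning_tree; infer_instance

-- ===== CLAIM (what is proved, stated in full; the proofs are below) =====
def Claim_equal_build_spanning_tree : Prop := ∀ (adj : List (String × List (String × String))) (roots : List String), Dom_build_spanning_tree adj roots → Spec_build_spanning_tree adj roots (build_spanning_tree adj roots)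

-- ===== LEMMAS AND PROOFS =====

-- ghost state: A's per-level claims, recorded as (index, node, parent, relation)
def clStep (iu : Int × String)
    (st : PySem.Dict String (Option String) × List (Int × String × String × String))
    (vr : String × String) :
    PySem.Dict String (Option String) × List (Int × String × String × String) :=
  if st.1.contains vr.1 then st
  else (st.1.insert vr.1 (some iu.2), st.2 ++ [(iu.1, vr.1, iu.2, vr.2)])

def clLevel (adj : List (String × List (String × String)))
    (L : List (Int × String)) (P : PySem.Dict String (Option String)) :
    PySem.Dict String (Option String) × List (Int × String × String × String) :=
  L.foldl (fun st iu => (nbrs adj iu.2).foldl (clStep iu) st)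
    (P, ([] : List (Int × String × String × String)))

def insP (d : PySem.Dict String (Option String)) (t : Int × String × String × String) :
    PySem.Dict String (Option String) := d.insert t.2.1 (some t.2.2.1)

def insE (d : PySem.Dict String String) (t : Int × String × String × String) :
    PySem.Dict String String := d.insert t.2.1 t.2.2.2

def lexlt (s t : Int × String × String × String) : Prop :=
  s.1 < t.1 ∨ (s.1 = t.1 ∧ s.2.1 < t.2.1)

-- the first unclaimed occurrence of every key, in scan order
def firsts : (String → Bool) → List (String × String) → List (String × String)
  | _, [] => []
  | T, vr :: l => if T vr.1 then firsts T l else vr :: firsts (fun v => v == vr.1 || T v) l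

lemma mem_firsts : ∀ (T : String → Bool) (l : List (String × String)) (x : String × String),
    x ∈ firsts T l → x ∈ l ∧ T x.1 = false := by
  intro T l
  induction l generalizing T with
  | nil => intro x hx; simp [firsts] at hx
  | cons vr l ih =>
    intro x hx
    by_cases h : T vr.1 = true
    · rw [firsts, if_pos h] at hx
      exact ⟨List.mem_cons_of_mem _ (ih T x hx).1, (ih T x hx).2⟩
    · rw [firsts, if_neg h] at hx
      rcases List.mem_cons.mp hx with rfl | hx'
      · exact ⟨List.mem_cons_self .., by simpa using h⟩
      · have := ih _ x hx'
        refine ⟨List.mem_cons_of_mem _ this.1, ?_⟩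
        have h2 := this.2
        simp only [Bool.or_eq_false_iff] at h2
        exact h2.2
    
lemma firsts_keys_nodup : ∀ (T : String → Bool) (l : List (String × String)),
    ((firsts T l).map (·.1)).Nodup := by
  intro T l
  induction l generalizing T with
  | nil => simp [firsts]
  | cons vr l ih =>
    by_cases h : T vr.1 = true
    · rw [firsts, if_pos h]; exact ih T
    · rw [firsts, if_neg h]
      simp only [List.map_cons, List.nodup_cons]
      refine ⟨?_, ih _⟩
      intro hmem
      rcases List.mem_map.mp hmem with ⟨x, hx, hx1⟩
      have := (mem_firsts _ _ _ hx).2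
      simp only [Bool.or_eq_false_iff] at this
      exact (by simpa [hx1] using this.1)

lemma firsts_pairwise : ∀ (T : String → Bool) (l : List (String × String)),
    l.Pairwise (fun a b => a.1 ≤ b.1) → (firsts T l).Pairwise (fun a b => a.1 < b.1) := by
  intro T l
  induction l generalizing T with
  | nil => intro _; simp [firsts]
  | cons vr l ih =>
    intro hpw
    rcases List.pairwise_cons.mp hpw with ⟨hhead, htail⟩
    by_cases h : T vr.1 = true
    · rw [firsts, if_pos h]; exact ih T htail
    · rw [firsts, if_neg h]
      refine List.pairwise_cons.mpr ⟨?_, ih _ htail⟩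
      intro y hy
      have hmem := mem_firsts _ _ _ hy
      have hne : y.1 ≠ vr.1 := by
        have h2 := hmem.2
        simp only [Bool.or_eq_false_iff] at h2
        simpa using h2.1
      exact lt_of_le_of_ne (hhead y hmem.1) (Ne.symm hne)

lemma firsts_filter (v : String) : ∀ (T : String → Bool) (l : List (String × String)),
    (firsts T l).filter (fun x => x.1 == v)
      = if T v then [] else (l.filter (fun x => x.1 == v)).take 1 := by
  intro T l
  induction l generalizing T with
  | nil => simp [firsts]
  | cons vr l ih =>
    by_cases hv : vr.1 = v
    · subst hv
      by_cases h : T vr.1 = true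
      · rw [firsts, if_pos h, ih T, if_pos h, if_pos h]
      · rw [firsts, if_neg h]
        have hT' : (vr.1 == vr.1 || T vr.1) = true := by simp
        simp only [List.filter_cons, BEq.rfl, if_pos, ih, hT']
        rw [if_neg h]
        simp
    · have hvb : (vr.1 == v) = false := by simpa using hv
      by_cases h : T vr.1 = true
      · rw [firsts, if_pos h, ih T]
        simp [List.filter_cons, hvb]
      · rw [firsts, if_neg h]
        have hT' : (v == vr.1 || T v) = T v := by
          have : (v == vr.1) = false := by simpa using (Ne.symm hv)
          simp [this]
        simp only [List.filter_cons, hvb, cond_false, if_neg, Bool.false_eq_true,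
          not_false_iff]
        rw [ih, hT']

lemma insertBy_nil {α : Type} (before : α → α → Bool) (x : α) :
    PySem.List.insertBy before x [] = [x] := rfl

lemma insertBy_cons {α : Type} (before : α → α → Bool) (x y : α) (ys : List α) :
    PySem.List.insertBy before x (y :: ys)
      = if before x y then x :: y :: ys else y :: PySem.List.insertBy before x ys := rfl

lemma filter_insertBy (x : String × String) (v : String) :
    ∀ (ys : List (String × String)), ys.Pairwise (fun a b => a.1 ≤ b.1) →
      (PySem.List.insertBy (fun a b => decide (a.1 < b.1)) x ys).filter (fun y => y.1 == v)
        = if x.1 == v then ys.filter (fun y => y.1 == v) ++ [x]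
          else ys.filter (fun y => y.1 == v) := by
  intro ys
  induction ys with
  | nil =>
    intro _
    rw [insertBy_nil]
    by_cases hx : (x.1 == v) = true <;> simp [hx, List.filter_cons]
  | cons y ys ih =>
    intro hpw
    rcases List.pairwise_cons.mp hpw with ⟨hhead, htail⟩
    rw [insertBy_cons]
    by_cases hb : (decide (x.1 < y.1)) = true
    · rw [if_pos hb]
      have hxy : x.1 < y.1 := of_decide_eq_true hb
      by_cases hx : (x.1 == v) = true
      · have hveq : v = x.1 := (eq_of_beq hx).symm
        have hnil : (y :: ys).filter (fun z => z.1 == v) = [] := by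
          apply List.filter_eq_nil_iff.mpr
          intro z hz
          have hle : y.1 ≤ z.1 := by
            rcases List.mem_cons.mp hz with rfl | hz'
            · exact le_refl _
            · exact hhead z hz'
          have : v < z.1 := lt_of_lt_of_le (hveq ▸ hxy) hle
          simp [Ne.symm (ne_of_lt this)]
        simp [List.filter_cons, hx, hnil]
      · have hx' : (x.1 == v) = false := by simpa using hx
        simp [List.filter_cons, hx']
    · rw [if_neg (by simpa using hb)]
      rw [List.filter_cons, ih htail]
      by_cases hx : (x.1 == v) = true <;> by_cases hy : (y.1 == v) = true <;>
        simp [List.filter_cons, hx, hy]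

lemma sorted_filter_key (v : String) : ∀ (l : List (String × String)),
    (PySem.List.sorted l (fun x => x.1) false).filter (fun x => x.1 == v)
      = l.filter (fun x => x.1 == v) := by
  intro l
  induction l using List.reverseRecOn with
  | nil => rfl
  | append_singleton l x ih =>
    have hs : PySem.List.sorted (l ++ [x]) (fun y => y.1) false
        = PySem.List.insertBy (fun a b => decide (a.1 < b.1)) x
            (PySem.List.sorted l (fun y => y.1) false) := by
      rw [PySem.List.sorted_eq_foldl_insertBy, List.foldl_append, List.foldl_cons,
        List.foldl_nil, ← PySem.List.sorted_eq_foldl_insertBy]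
    rw [hs, filter_insertBy x v _ (PySem.List.sorted_pairwise l (fun y => y.1)),
      List.filter_append]
    by_cases hx : (x.1 == v) = true <;> simp [List.filter_cons, hx, ih]

lemma firsts_sorted (T : String → Bool) (l : List (String × String)) :
    firsts T (PySem.List.sorted l (fun x => x.1) false)
      = PySem.List.sorted (firsts T l) (fun x => x.1) false := by
  refine (PySem.List.sorted_eq_of_perm_of_pairwise_lt _ _ _ ?_ ?_).symm
  · refine List.perm_iff_count.mpr ?_
    intro y
    have hcnt : ∀ (L : List (String × String)),
        List.count y L = List.count y (L.filter (fun x => x.1 == y.1)) :=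
      fun L => (List.count_filter (by simp)).symm
    rw [hcnt, hcnt (firsts T l), firsts_filter, firsts_filter, sorted_filter_key]
  · exact firsts_pairwise T _ (PySem.List.sorted_pairwise l (fun x => x.1))

lemma sorted2_eq_of_perm_of_pairwise_lt (xs ys : List String) (k1 : String → Int)
    (hperm : ys.Perm xs)
    (hpw : ys.Pairwise (fun a b => k1 a < k1 b ∨ (k1 a = k1 b ∧ a < b))) :
    PySem.List.sorted2 xs k1 (fun v => v) false = ys := by
  have hbe : (fun (a b : String) =>
        decide (k1 a < k1 b) || (!decide (k1 b < k1 a) && decide (a < b)))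
      = (fun a b => decide (toLex (k1 a, a) < toLex (k1 b, b))) := by
    funext a b
    rcases lt_trichotomy (k1 a) (k1 b) with h | h | h
    · simp [h, Prod.Lex.lt_iff, lt_asymm h]
    · simp [h, Prod.Lex.lt_iff, lt_irrefl]
    · have h1 : ¬ k1 a < k1 b := lt_asymm h
      have h2 : k1 a ≠ k1 b := (ne_of_lt h).symm
      simp [Prod.Lex.lt_iff, h, h1, h2]
  have hkey : PySem.List.sorted2 xs k1 (fun v => v) false
      = PySem.List.sorted xs (fun a => toLex (k1 a, a)) false := by
    simp only [PySem.List.sorted2, PySem.List.sorted]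
    rw [hbe]
    simp
  rw [hkey]
  refine PySem.List.sorted_eq_of_perm_of_pairwise_lt _ _ _ hperm ?_
  refine hpw.imp ?_
  intro a b h
  rw [Prod.Lex.lt_iff]
  simpa using h

-- contains after an insert-only fold
lemma contains_foldl_insert {ν : Type} (g : String × String → ν) :
    ∀ (l : List (String × String)) (d : PySem.Dict String ν) (v : String),
      (l.foldl (fun c vr => c.insert vr.1 (g vr)) d).contains v
        = (d.contains v || l.any (fun vr => vr.1 == v)) := by
  intro l
  induction l with
  | nil => intro d v; simp
  | cons vr l ih =>
    intro d v
    simp only [List.foldl_cons, List.any_cons, ih]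
    rw [PySem.Dict.contains_insert]
    by_cases hv : vr.1 = v
    · simp [hv]
    · have h1 : (v == vr.1) = false := by simpa using (Ne.symm hv)
      have h2 : (vr.1 == v) = false := by simpa using hv
      simp [h1, h2]

lemma any_perm {l l' : List (String × String)} (h : l.Perm l')
    (f : String × String → Bool) : l.any f = l'.any f := by
  rw [Bool.eq_iff_iff]
  simp only [List.any_eq_true]
  constructor
  · rintro ⟨x, hx, hfx⟩; exact ⟨x, h.mem_iff.mp hx, hfx⟩
  · rintro ⟨x, hx, hfx⟩; exact ⟨x, h.mem_iff.mpr hx, hfx⟩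

-- A's inner loop as firsts
lemma clfold_firsts (iu : Int × String) :
    ∀ (l : List (String × String)) (P : PySem.Dict String (Option String))
      (cl : List (Int × String × String × String)) (T : String → Bool),
      (∀ v, P.contains v = T v) →
      l.foldl (clStep iu) (P, cl)
        = ((firsts T l).foldl (fun d vr => d.insert vr.1 (some iu.2)) P,
           cl ++ (firsts T l).map (fun vr => (iu.1, vr.1, iu.2, vr.2))) := by
  intro l
  induction l with
  | nil => intro P cl T _; simp [firsts]
  | cons vr l ih =>
    intro P cl T hT
    by_cases h : T vr.1 = true
    · have hc : P.contains vr.1 = true := by rw [hT]; exact h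
      rw [firsts, if_pos h]
      simpa only [List.foldl_cons, clStep, hc, if_pos] using ih P cl T hT
    · have hc : P.contains vr.1 = false := by rw [hT]; simpa using h
      rw [firsts, if_neg h]
      simp only [List.foldl_cons, clStep, hc, Bool.false_eq_true, if_neg, not_false_iff]
      rw [ih (P.insert vr.1 (some iu.2)) (cl ++ [(iu.1, vr.1, iu.2, vr.2)])
        (fun v => v == vr.1 || T v)
        (by intro v; rw [PySem.Dict.contains_insert, hT])]
      simp [List.append_assoc]

-- B's inner loop as firsts
lemma candfold_firsts (p : PySem.Dict String (Option String)) (iu : Int × String) :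
    ∀ (l : List (String × String)) (cand : PySem.Dict String (Int × String))
      (T : String → Bool),
      (∀ v, (p.contains v || cand.contains v) = T v) →
      l.foldl (candStep p iu) cand
        = (firsts T l).foldl (fun c vr => c.insert vr.1 (iu.1, vr.2)) cand := by
  intro l
  induction l with
  | nil => intro cand T _; simp [firsts]
  | cons vr l ih =>
    intro cand T hT
    by_cases h : T vr.1 = true
    · have hc : (!(p.contains vr.1) && !(cand.contains vr.1)) = false := by
        have := hT vr.1
        rw [h] at this
        rcases Bool.or_eq_true_iff.mp this with h1 | h1 <;> simp [h1]
      rw [firsts, if_pos h]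
      simp only [List.foldl_cons, candStep, hc, Bool.false_eq_true, if_neg, not_false_iff]
      exact ih cand T hT
    · have hor : (p.contains vr.1 || cand.contains vr.1) = false := by
        rw [hT]; simpa using h
      rcases Bool.or_eq_false_iff.mp hor with ⟨h1, h2⟩
      have hc : (!(p.contains vr.1) && !(cand.contains vr.1)) = true := by simp [h1, h2]
      rw [firsts, if_neg h]
      simp only [List.foldl_cons, candStep, hc, if_pos, List.foldl_cons]
      refine ih (cand.insert vr.1 (iu.1, vr.2)) (fun v => v == vr.1 || T v) ?_
      intro v
      rw [PySem.Dict.contains_insert]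
      show (p.contains v || (v == vr.1 || cand.contains v)) = (v == vr.1 || T v)
      rw [← hT v, Bool.or_left_comm]

-- A's visit loop as firsts
lemma visitfold_firsts (u : String) :
    ∀ (l : List (String × String)) (P : PySem.Dict String (Option String))
      (E : PySem.Dict String String) (Q : List String) (T : String → Bool),
      (∀ v, P.contains v = T v) →
      l.foldl (visit u) (P, E, Q)
        = ((firsts T l).foldl (fun d vr => d.insert vr.1 (some u)) P,
           (firsts T l).foldl (fun d vr => d.insert vr.1 vr.2) E,
           Q ++ (firsts T l).map (·.1)) := by
  intro l
  induction l with
  | nil => intro P E Q T _; simp [firsts]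
  | cons vr l ih =>
    intro P E Q T hT
    by_cases h : T vr.1 = true
    · have hc : P.contains vr.1 = true := by rw [hT]; exact h
      rw [firsts, if_pos h]
      simpa only [List.foldl_cons, visit, hc, Bool.not_true, Bool.false_eq_true, if_neg,
        not_false_iff] using ih P E Q T hT
    · have hc : P.contains vr.1 = false := by rw [hT]; simpa using h
      rw [firsts, if_neg h]
      simp only [List.foldl_cons, visit, hc, Bool.not_false, if_pos]
      rw [ih (P.insert vr.1 (some u)) (E.insert vr.1 vr.2) (Q ++ [vr.1])
        (fun v => v == vr.1 || T v)
        (by intro v; rw [PySem.Dict.contains_insert, hT])]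
      simp [List.append_assoc]

-- the claims accumulator only ever grows by appending
lemma clLevel_acc (adj : List (String × List (String × String))) :
    ∀ (L : List (Int × String)) (P : PySem.Dict String (Option String))
      (cl : List (Int × String × String × String)),
      L.foldl (fun st iu => (nbrs adj iu.2).foldl (clStep iu) st) (P, cl)
        = ((clLevel adj L P).1, cl ++ (clLevel adj L P).2) := by
  intro L
  induction L with
  | nil => intro P cl; simp [clLevel]
  | cons iu L ih =>
    intro P cl
    have h1 := clfold_firsts iu (nbrs adj iu.2) P cl (fun v => P.contains v) (fun v => rfl)
    have h2 := clfold_firsts iu (nbrs adj iu.2) P [] (fun v => P.contains v) (fun v => rfl)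
    simp only [clLevel, List.foldl_cons, h1, h2, List.nil_append]
    rw [ih, ih]
    simp [List.append_assoc, clLevel]

-- A's level fold, in terms of the ghost claims
lemma visit_level_eq (adj : List (String × List (String × String))) :
    ∀ (L : List (Int × String)) (P : PySem.Dict String (Option String))
      (E : PySem.Dict String String) (Q : List String),
      L.foldl (fun st iu => (nbrs adj iu.2).foldl (visit iu.2) st) (P, E, Q)
        = ((clLevel adj L P).1, (clLevel adj L P).2.foldl insE E,
           Q ++ (clLevel adj L P).2.map (·.2.1)) := by
  intro L
  induction L with
  | nil => intro P E Q; simp [clLevel]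
  | cons iu L ih =>
    intro P E Q
    have hv := visitfold_firsts iu.2 (nbrs adj iu.2) P E Q (fun v => P.contains v)
      (fun v => rfl)
    have hcl := clfold_firsts iu (nbrs adj iu.2) P [] (fun v => P.contains v) (fun v => rfl)
    have hlev : clLevel adj (iu :: L) P
        = ((clLevel adj L ((firsts (fun v => P.contains v) (nbrs adj iu.2)).foldl
              (fun d vr => d.insert vr.1 (some iu.2)) P)).1,
           (firsts (fun v => P.contains v) (nbrs adj iu.2)).map
              (fun vr => (iu.1, vr.1, iu.2, vr.2))
             ++ (clLevel adj L ((firsts (fun v => P.contains v) (nbrs adj iu.2)).foldl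
              (fun d vr => d.insert vr.1 (some iu.2)) P)).2) := by
      simp only [clLevel, List.foldl_cons, hcl, List.nil_append]
      rw [clLevel_acc]
      rfl
    simp only [List.foldl_cons, hv, ih, hlev]
    refine congrArg₂ _ rfl (congrArg₂ _ ?_ ?_)
    · rw [List.foldl_append, List.foldl_map]
      rfl
    · simp [List.append_assoc]

lemma pairwise_lt_of_le_nodup : ∀ (l : List (String × String)),
    l.Pairwise (fun a b => a.1 ≤ b.1) → (l.map (·.1)).Nodup →
    l.Pairwise (fun a b => a.1 < b.1) := by
  intro l
  induction l with
  | nil => intro _ _; simp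
  | cons a l ih =>
    intro hpw hnd
    rcases List.pairwise_cons.mp hpw with ⟨hhead, htail⟩
    simp only [List.map_cons, List.nodup_cons] at hnd
    refine List.pairwise_cons.mpr ⟨?_, ih htail hnd.2⟩
    intro b hb
    refine lt_of_le_of_ne (hhead b hb) ?_
    intro heq
    exact hnd.1 (heq ▸ List.mem_map.mpr ⟨b, hb, rfl⟩)

-- the master correspondence between A's per-level claims and B's candidate dict
lemma master (adj : List (String × List (String × String)))
    (p : PySem.Dict String (Option String)) (fr : List String) :
    ∀ (L : List (Int × String)) (P : PySem.Dict String (Option String))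
      (cand : PySem.Dict String (Int × String)),
      (∀ v, P.contains v = (p.contains v || cand.contains v)) →
      cand.keys.Nodup →
      (∀ x ∈ L, 0 ≤ x.1 ∧ PySem.List.pyGetD fr x.1 "" = x.2) →
      L.Pairwise (fun a b => a.1 < b.1) →
      ((clLevel adj L P).1 = (clLevel adj L P).2.foldl insP P)
      ∧ (L.foldl (candGroup adj p) cand).keys.Perm
          (cand.keys ++ (clLevel adj L P).2.map (·.2.1))
      ∧ (∀ t ∈ (clLevel adj L P).2,
          (L.foldl (candGroup adj p) cand).get? t.2.1 = some (t.1, t.2.2.2))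
      ∧ (∀ v q, cand.get? v = some q → (L.foldl (candGroup adj p) cand).get? v = some q)
      ∧ (clLevel adj L P).2.Pairwise lexlt
      ∧ (∀ t ∈ (clLevel adj L P).2,
          0 ≤ t.1 ∧ PySem.List.pyGetD fr t.1 "" = t.2.2.1 ∧ P.contains t.2.1 = false)
      ∧ ((clLevel adj L P).2.map (·.2.1)).Nodup
      ∧ (∀ t ∈ (clLevel adj L P).2, t.1 ∈ L.map (·.1)) := by
  intro L
  induction L with
  | nil =>
    intro P cand hsync hnd hL hLpw
    refine ⟨rfl, by simp [clLevel], by simp [clLevel], ?_, by simp [clLevel],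
      by simp [clLevel], by simp [clLevel], by simp [clLevel]⟩
    intro v q h; simpa [clLevel] using h
  | cons iu L ih =>
    intro P cand hsync hnd hL hLpw
    set raw := rawNbrs adj iu.2 with hraw
    set fg := firsts (fun v => P.contains v) raw with hfg
    set sfg := PySem.List.sorted fg (fun x => x.1) false with hsfg
    set P₁ := sfg.foldl (fun d vr => d.insert vr.1 (some iu.2)) P with hP₁
    set cand₁ := fg.foldl (fun c vr => c.insert vr.1 (iu.1, vr.2)) cand with hcand₁
    have hfirsts_nbrs : firsts (fun v => P.contains v) (nbrs adj iu.2) = sfg := by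
      have hnb : nbrs adj iu.2 = PySem.List.sorted raw (fun x => x.1) false := rfl
      rw [hnb, hsfg, hfg]
      exact firsts_sorted _ _
    have hgroupA : (nbrs adj iu.2).foldl (clStep iu)
          (P, ([] : List (Int × String × String × String)))
        = (P₁, sfg.map (fun vr => (iu.1, vr.1, iu.2, vr.2))) := by
      rw [clfold_firsts iu _ P [] (fun v => P.contains v) (fun v => rfl), hfirsts_nbrs]
      simp [hP₁]
    have hlev : clLevel adj (iu :: L) P
        = ((clLevel adj L P₁).1,
           sfg.map (fun vr => (iu.1, vr.1, iu.2, vr.2)) ++ (clLevel adj L P₁).2) := by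
      show (iu :: L).foldl (fun st iu => (nbrs adj iu.2).foldl (clStep iu) st)
          (P, ([] : List (Int × String × String × String))) = _
      rw [List.foldl_cons, hgroupA, clLevel_acc]
    have hgroupB : candGroup adj p cand iu = cand₁ := by
      rw [candGroup, candfold_firsts p iu raw cand (fun v => P.contains v)
        (fun v => (hsync v).symm)]
    have hfgP : ∀ vr ∈ fg, P.contains vr.1 = false := fun vr h => (mem_firsts _ _ _ h).2
    have hfgfresh : ∀ vr ∈ fg, cand.contains vr.1 = false := by
      intro vr h
      have h2 := hsync vr.1
      rw [hfgP vr h] at h2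
      exact (Bool.or_eq_false_iff.mp h2.symm).2
    have hfgnodup : (fg.map (·.1)).Nodup := firsts_keys_nodup _ _
    have hsfg_perm : sfg.Perm fg := PySem.List.sorted_perm _ _ _
    have hsfgkeys_perm : (sfg.map (·.1)).Perm (fg.map (·.1)) := hsfg_perm.map _
    have hsfgnodup : (sfg.map (·.1)).Nodup := (hsfgkeys_perm.nodup_iff).mpr hfgnodup
    have hitems : cand₁.items = cand.items ++ fg.map (fun vr => (vr.1, (iu.1, vr.2))) := by
      rw [hcand₁]
      exact PySem.Dict.items_foldl_insert_fresh fg (fun vr => vr.1)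
        (fun vr => (iu.1, vr.2)) cand hfgfresh hfgnodup
    have hkeys₁ : cand₁.keys = cand.keys ++ fg.map (·.1) := by
      show cand₁.items.map (·.1) = cand.items.map (·.1) ++ fg.map (·.1)
      rw [hitems, List.map_append, List.map_map]
      rfl
    have hnd₁ : cand₁.keys.Nodup := by
      rw [hkeys₁]
      refine List.nodup_append.mpr ⟨hnd, hfgnodup, ?_⟩
      intro a ha b hb
      rcases List.mem_map.mp hb with ⟨vr, hvr, rfl⟩
      intro heq
      have h1 : cand.contains vr.1 = true := by
        rw [PySem.Dict.contains_iff_mem_keys]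
        exact heq ▸ ha
      rw [hfgfresh vr hvr] at h1
      exact Bool.noConfusion h1
    have hsyncP₁ : ∀ v, P₁.contains v
        = (P.contains v || sfg.any (fun vr => vr.1 == v)) := by
      intro v
      rw [hP₁]
      exact contains_foldl_insert (fun _ => some iu.2) sfg P v
    have hsynccand₁ : ∀ v, cand₁.contains v
        = (cand.contains v || fg.any (fun vr => vr.1 == v)) := by
      intro v
      rw [hcand₁]
      exact contains_foldl_insert (fun vr => (iu.1, vr.2)) fg cand v
    have hsync₁ : ∀ v, P₁.contains v = (p.contains v || cand₁.contains v) := by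
      intro v
      rw [hsyncP₁ v, any_perm hsfg_perm, hsync v, hsynccand₁ v, Bool.or_assoc]
    obtain ⟨M1, M2, M3, M4, M5, M6, M7, M8⟩ :=
      ih P₁ cand₁ hsync₁ hnd₁ (fun x hx => hL x (List.mem_cons_of_mem _ hx))
        (List.pairwise_cons.mp hLpw).2
    have hLhead : ∀ b ∈ L, iu.1 < b.1 := (List.pairwise_cons.mp hLpw).1
    have hiu := hL iu (List.mem_cons_self ..)
    have hBfold : (iu :: L).foldl (candGroup adj p) cand
        = L.foldl (candGroup adj p) cand₁ := by
      rw [List.foldl_cons, hgroupB]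
    have hΔgkeys : (sfg.map (fun vr => (iu.1, vr.1, iu.2, vr.2))).map
        ((·.2.1) : Int × String × String × String → String) = sfg.map (·.1) := by
      rw [List.map_map]
      rfl
    rw [hlev, hBfold]
    refine ⟨?_, ?_, ?_, ?_, ?_, ?_, ?_, ?_⟩
    · -- flattened parent dict
      have hPg : (sfg.map (fun vr => (iu.1, vr.1, iu.2, vr.2))).foldl insP P = P₁ := by
        rw [List.foldl_map, hP₁]
        rfl
      rw [List.foldl_append, hPg]
      exact M1
    · -- key permanence
      have hmap : ((sfg.map (fun vr => (iu.1, vr.1, iu.2, vr.2)))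
            ++ (clLevel adj L P₁).2).map (·.2.1)
          = sfg.map (·.1) ++ (clLevel adj L P₁).2.map (·.2.1) := by
        rw [List.map_append, hΔgkeys]
      rw [hmap]
      refine M2.trans ?_
      rw [hkeys₁, List.append_assoc]
      exact List.Perm.append_left cand.keys
        (List.Perm.append_right _ hsfgkeys_perm.symm)
    · -- lookup of every claim
      intro t ht
      rcases List.mem_append.mp ht with htg | ht'
      · rcases List.mem_map.mp htg with ⟨vr, hvr, rfl⟩
        have hvfg : vr ∈ fg := hsfg_perm.mem_iff.mp hvr
        have hmemit : (vr.1, (iu.1, vr.2)) ∈ cand₁.items := by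
          rw [hitems]
          exact List.mem_append_right _ (List.mem_map.mpr ⟨vr, hvfg, rfl⟩)
        exact M4 vr.1 (iu.1, vr.2) (PySem.Dict.get?_of_mem_items _ hmemit hnd₁)
      · exact M3 t ht'
    · -- old entries preserved
      intro v q hq
      have hv : (v, q) ∈ cand.items := PySem.Dict.mem_items_of_get?_eq_some _ hq
      have hv1 : (v, q) ∈ cand₁.items := by
        rw [hitems]
        exact List.mem_append_left _ hv
      exact M4 v q (PySem.Dict.get?_of_mem_items _ hv1 hnd₁)
    · -- pairwise lexlt
      refine List.pairwise_append.mpr ⟨?_, M5, ?_⟩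
      · refine List.pairwise_map.mpr ?_
        have hsp : sfg.Pairwise (fun a b => a.1 < b.1) :=
          pairwise_lt_of_le_nodup sfg (PySem.List.sorted_pairwise fg (fun x => x.1))
            hsfgnodup
        exact hsp.imp (fun h => Or.inr ⟨rfl, h⟩)
      · intro s hs t ht'
        rcases List.mem_map.mp hs with ⟨vr, _, rfl⟩
        rcases List.mem_map.mp (M8 t ht') with ⟨x, hx, hx1⟩
        exact Or.inl (hx1 ▸ hLhead x hx)
    · -- per-claim index data
      intro t ht
      rcases List.mem_append.mp ht with htg | ht'
      · rcases List.mem_map.mp htg with ⟨vr, hvr, rfl⟩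
        exact ⟨hiu.1, hiu.2, hfgP vr (hsfg_perm.mem_iff.mp hvr)⟩
      · obtain ⟨h0, hg, hP₁c⟩ := M6 t ht'
        refine ⟨h0, hg, ?_⟩
        have h2 := hsyncP₁ t.2.1
        rw [hP₁c] at h2
        exact (Bool.or_eq_false_iff.mp h2.symm).1
    · -- claimed nodes distinct
      rw [List.map_append, hΔgkeys]
      refine List.nodup_append.mpr ⟨hsfgnodup, M7, ?_⟩
      intro a ha b hb heq
      rcases List.mem_map.mp ha with ⟨vr, hvr, rfl⟩
      rcases List.mem_map.mp hb with ⟨t, ht, ht1⟩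
      have h1 : P₁.contains vr.1 = true := by
        rw [hsyncP₁]
        have hany : sfg.any (fun x => x.1 == vr.1) = true :=
          List.any_eq_true.mpr ⟨vr, hvr, by simp⟩
        simp [hany]
      have h2 : P₁.contains t.2.1 = false := (M6 t ht).2.2
      rw [ht1, ← heq, h1] at h2
      exact Bool.noConfusion h2
    · -- indices come from the group list
      intro t ht
      rcases List.mem_append.mp ht with htg | ht'
      · rcases List.mem_map.mp htg with ⟨vr, _, rfl⟩
        simp
      · simp only [List.map_cons]
        exact List.mem_cons_of_mem _ (M8 t ht')

-- one exact level step: A's sequential fold equals B's gather/sort/commit step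
lemma level_eq (adj : List (String × List (String × String)))
    (p : PySem.Dict String (Option String)) (e : PySem.Dict String String)
    (fr : List String) :
    fr.foldl (fun st u => (nbrs adj u).foldl (visit u) st) (p, e, ([] : List String))
      = (((nxtOf (candLevel adj p fr)).foldl (commitStep fr (candLevel adj p fr)) (p, e)).1,
         ((nxtOf (candLevel adj p fr)).foldl (commitStep fr (candLevel adj p fr)) (p, e)).2,
         nxtOf (candLevel adj p fr)) := by
  have hL : ∀ x ∈ PySem.List.enumerate fr 0,
      0 ≤ x.1 ∧ PySem.List.pyGetD fr x.1 "" = x.2 := by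
    intro x hx
    rcases (PySem.List.mem_enumerate_iff fr 0 x).mp hx with ⟨k, hk, rfl⟩
    refine ⟨by simpa using Int.natCast_nonneg k, ?_⟩
    show PySem.List.pyGetD fr ((0 : Int) + (k : Int)) "" = fr[k]
    rw [zero_add, PySem.List.pyGetD_natCast, List.getD_eq_getElem fr "" hk]
  obtain ⟨M1, M2, M3, M4, M5, M6, M7, M8⟩ :=
    master adj p fr (PySem.List.enumerate fr 0) p PySem.Dict.empty
      (by intro v; simp) (by simp) hL (PySem.List.pairwise_lt_enumerate fr 0)
  have hcand : candLevel adj p fr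
      = (PySem.List.enumerate fr 0).foldl (candGroup adj p) PySem.Dict.empty := rfl
  have hget : ∀ t ∈ (clLevel adj (PySem.List.enumerate fr 0) p).2,
      (candLevel adj p fr).getD t.2.1 (0, "") = (t.1, t.2.2.2) := by
    intro t ht
    rw [PySem.Dict.getD_eq_get?_getD, hcand, M3 t ht]
    rfl
  have hnxt : nxtOf (candLevel adj p fr)
      = (clLevel adj (PySem.List.enumerate fr 0) p).2.map (·.2.1) := by
    refine sorted2_eq_of_perm_of_pairwise_lt _ _ _ ?_ ?_
    · rw [hcand]
      refine (M2.trans ?_).symm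
      simp
    · refine List.pairwise_map.mpr ?_
      refine List.Pairwise.imp_of_mem ?_ M5
      intro a b ha hb hr
      have hka : ((candLevel adj p fr).getD a.2.1 (0, "")).1 = a.1 := by
        rw [hget a ha]
      have hkb : ((candLevel adj p fr).getD b.2.1 (0, "")).1 = b.1 := by
        rw [hget b hb]
      rcases hr with h | ⟨h1, h2⟩
      · exact Or.inl (by rw [hka, hkb]; exact h)
      · exact Or.inr ⟨by rw [hka, hkb]; exact h1, h2⟩
  have hcommit : ((clLevel adj (PySem.List.enumerate fr 0) p).2.map (·.2.1)).foldl
        (commitStep fr (candLevel adj p fr)) (p, e)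
      = ((clLevel adj (PySem.List.enumerate fr 0) p).2.foldl insP p,
         (clLevel adj (PySem.List.enumerate fr 0) p).2.foldl insE e) := by
    rw [List.foldl_map]
    rw [PySem.List.foldl_congr_mem _ _
      (fun (pe : PySem.Dict String (Option String) × PySem.Dict String String) t =>
        (insP pe.1 t, insE pe.2 t)) (p, e) ?_]
    · exact PySem.List.foldl_prod_mk insP insE _ p e
    · intro acc t ht
      have hgt := hget t ht
      have hgd := (M6 t ht).2.1
      simp only [commitStep, hgt, insP, insE, hgd]
  have hA : fr.foldl (fun st u => (nbrs adj u).foldl (visit u) st) (p, e, ([] : List String))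
      = ((clLevel adj (PySem.List.enumerate fr 0) p).1,
         (clLevel adj (PySem.List.enumerate fr 0) p).2.foldl insE e,
         (clLevel adj (PySem.List.enumerate fr 0) p).2.map (·.2.1)) := by
    conv_lhs => rw [show fr = (PySem.List.enumerate fr 0).map (·.2) from
      (PySem.List.map_snd_enumerate fr 0).symm]
    rw [List.foldl_map, visit_level_eq adj (PySem.List.enumerate fr 0) p e []]
    simp
  rw [hA, hnxt, hcommit, M1]

-- appending into a non-empty queue just prefixes it to the fresh run
lemma visit_acc (u : String) :
    ∀ (l : List (String × String)) (p : PySem.Dict String (Option String))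
      (e : PySem.Dict String String) (q : List String),
      l.foldl (visit u) (p, e, q)
        = ((l.foldl (visit u) (p, e, ([] : List String))).1,
           (l.foldl (visit u) (p, e, ([] : List String))).2.1,
           q ++ (l.foldl (visit u) (p, e, ([] : List String))).2.2) := by
  intro l
  induction l with
  | nil => intro p e q; simp
  | cons x l ih =>
    intro p e q
    by_cases hc : p.contains x.1 = true
    · simp only [List.foldl_cons, visit, hc, Bool.not_true, if_neg, Bool.false_eq_true,
        not_false_iff, reduceIte]
      exact ih p e q
    · have hnc : p.contains x.1 = false := by simpa using hc
      simp only [List.foldl_cons, visit, hnc, Bool.not_false, if_pos]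
      rw [ih (p.insert x.1 (some u)) (e.insert x.1 x.2) (q ++ [x.1]),
          ih (p.insert x.1 (some u)) (e.insert x.1 x.2) ([] ++ [x.1])]
      simp

lemma level_acc (adj : List (String × List (String × String))) :
    ∀ (fr : List String) (p : PySem.Dict String (Option String))
      (e : PySem.Dict String String) (q : List String),
      fr.foldl (fun st u => (nbrs adj u).foldl (visit u) st) (p, e, q)
        = ((fr.foldl (fun st u => (nbrs adj u).foldl (visit u) st) (p, e, ([] : List String))).1,
           (fr.foldl (fun st u => (nbrs adj u).foldl (visit u) st) (p, e, ([] : List String))).2.1,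
           q ++ (fr.foldl (fun st u => (nbrs adj u).foldl (visit u) st) (p, e, ([] : List String))).2.2) := by
  intro fr
  induction fr with
  | nil => intro p e q; simp
  | cons u fr ih =>
    intro p e q
    simp only [List.foldl_cons]
    rw [visit_acc u (nbrs adj u) p e q]
    rw [ih ((nbrs adj u).foldl (visit u) (p, e, ([] : List String))).1
          ((nbrs adj u).foldl (visit u) (p, e, ([] : List String))).2.1
          (q ++ ((nbrs adj u).foldl (visit u) (p, e, ([] : List String))).2.2),
        ih ((nbrs adj u).foldl (visit u) (p, e, ([] : List String))).1
          ((nbrs adj u).foldl (visit u) (p, e, ([] : List String))).2.1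
          ((nbrs adj u).foldl (visit u) (p, e, ([] : List String))).2.2]
    simp

lemma bfsA_split (adj : List (String × List (String × String))) :
    ∀ (l₁ l₂ : List String) (p : PySem.Dict String (Option String))
      (e : PySem.Dict String String),
      bfsA adj (l₁ ++ l₂) p e
        = bfsA adj
            (l₂ ++ (l₁.foldl (fun st u => (nbrs adj u).foldl (visit u) st) (p, e, ([] : List String))).2.2)
            (l₁.foldl (fun st u => (nbrs adj u).foldl (visit u) st) (p, e, ([] : List String))).1
            (l₁.foldl (fun st u => (nbrs adj u).foldl (visit u) st) (p, e, ([] : List String))).2.1 := by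
  intro l₁
  induction l₁ with
  | nil => intro l₂ p e; simp
  | cons u l₁ ih =>
    intro l₂ p e
    have hA : bfsA adj (u :: (l₁ ++ l₂)) p e
        = bfsA adj ((nbrs adj u).foldl (visit u) (p, e, l₁ ++ l₂)).2.2
            ((nbrs adj u).foldl (visit u) (p, e, l₁ ++ l₂)).1
            ((nbrs adj u).foldl (visit u) (p, e, l₁ ++ l₂)).2.1 := by
      rw [bfsA]
    rw [List.cons_append, hA, visit_acc u (nbrs adj u) p e (l₁ ++ l₂)]
    simp only [List.append_assoc]
    rw [ih (l₂ ++ ((nbrs adj u).foldl (visit u) (p, e, ([] : List String))).2.2)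
          ((nbrs adj u).foldl (visit u) (p, e, ([] : List String))).1
          ((nbrs adj u).foldl (visit u) (p, e, ([] : List String))).2.1]
    simp only [List.foldl_cons]
    rw [level_acc adj l₁
          ((nbrs adj u).foldl (visit u) (p, e, ([] : List String))).1
          ((nbrs adj u).foldl (visit u) (p, e, ([] : List String))).2.1
          ((nbrs adj u).foldl (visit u) (p, e, ([] : List String))).2.2]
    simp [List.append_assoc]

lemma bfsB_eq_bfsA_aux (adj : List (String × List (String × String))) :
    ∀ (n : Nat) (fr : List String) (p : PySem.Dict String (Option String))
      (e : PySem.Dict String String), 2 * unvis adj p + fr.length ≤ n →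
      bfsB adj fr p e = bfsA adj fr p e := by
  intro n
  induction n with
  | zero =>
    intro fr p e hn
    have : fr = [] := by
      cases fr with
      | nil => rfl
      | cons a t => simp [List.length_cons] at hn
    subst this
    rw [bfsB.eq_def, bfsA]
    simp
  | succ n ih =>
    intro fr p e hn
    by_cases h : fr = []
    · subst h; rw [bfsB.eq_def, bfsA]; simp
    · rw [bfsB.eq_def]
      simp only [h, dif_neg, not_false_iff]
      have hm := bfsB_measure adj fr p e
      have hl : 0 < fr.length := List.length_pos_of_ne_nil h
      rw [ih _ _ _ (by omega)]
      have hsplit := bfsA_split adj fr [] p e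
      simp only [List.append_nil, List.nil_append] at hsplit
      rw [hsplit, level_eq adj p e fr]

lemma bfsB_eq_bfsA (adj : List (String × List (String × String)))
    (fr : List String) (p : PySem.Dict String (Option String))
    (e : PySem.Dict String String) : bfsB adj fr p e = bfsA adj fr p e :=
  bfsB_eq_bfsA_aux adj (2 * unvis adj p + fr.length) fr p e (Nat.le_refl _)

-- ===== VERDICT (by name: the statement is the Claim_ definition above) =====
theorem build_spanning_tree_spec : Claim_equal_build_spanning_tree := by
  intro adj roots _
  unfold Spec_build_spanning_tree build_spanning_tree build_spanning_tree_alt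
  simp only [bfsB_eq_bfsA]
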